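-- pv_equiv track=rewrite | github.com/chridey/hidey_ddseminar | src/dependencyRNN/data/eventContextData.py | makeEvent
-- ===== SOURCE A (Python) =====
-- def makeEvent(predicate, subjects, objects, indirectObjects):
--     predicate_index = len(subjects) + len(objects) + len(indirectObjects)
--     idxs = []
--     rel_idxs = []
--     p = []
--
--     for childGroup,relation in ((subjects, 1),
--                                (objects, 2),
--                                (indirectObjects, 3)):
--         for child in childGroup:
--             idxs.append(child)
--             rel_idxs.append(relation)
--             p.append(predicate_index)
--
--     idxs.append(predicate)
--     rel_idxs.append(0)
--     p.append(predicate_index+1)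
--
--     return idxs, rel_idxs, p
-- ===== SOURCE B (Python) =====
-- def makeEvent(predicate, subjects, objects, indirectObjects):
--     # Positional formulation: concatenate the nodes once, then derive the
--     # relation tag and parent of each position i by comparing i against the
--     # group boundaries, instead of emitting tags while traversing the groups.
--     s, o = len(subjects), len(objects)
--     n = s + o + len(indirectObjects)
--     idxs = subjects + objects + indirectObjects + [predicate]
--     rel_idxs = [0 if i == n else 1 if i < s else 2 if i < s + o else 3
--                 for i in range(n + 1)]
--     p = [n + (1 if i == n else 0) for i in range(n + 1)]
--     return idxs, rel_idxs, p
-- ===== Notes on version B (the rewrite author's own statement) =====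
-- stated objective: alternative
-- what changed: B concatenates the node lists once and then derives each position's relation tag and parent by index arithmetic against the group boundaries (a comprehension over range(n+1)), instead of A's interleaved append loop that emits all three lists while traversing the groups.
import Mathlib
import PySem

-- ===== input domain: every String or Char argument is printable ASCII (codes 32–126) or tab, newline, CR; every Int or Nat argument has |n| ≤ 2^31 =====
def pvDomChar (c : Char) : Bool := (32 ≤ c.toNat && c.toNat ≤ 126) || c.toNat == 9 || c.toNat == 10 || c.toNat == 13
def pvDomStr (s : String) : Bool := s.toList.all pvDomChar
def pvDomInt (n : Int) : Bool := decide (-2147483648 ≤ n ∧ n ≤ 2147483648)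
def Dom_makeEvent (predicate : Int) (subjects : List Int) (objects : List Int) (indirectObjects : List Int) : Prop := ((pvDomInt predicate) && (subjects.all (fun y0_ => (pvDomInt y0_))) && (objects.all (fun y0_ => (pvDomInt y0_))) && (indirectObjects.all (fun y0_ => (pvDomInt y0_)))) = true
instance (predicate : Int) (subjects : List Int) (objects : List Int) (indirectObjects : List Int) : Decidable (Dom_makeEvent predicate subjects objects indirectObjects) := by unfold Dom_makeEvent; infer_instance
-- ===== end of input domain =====

-- B concatenates the nodes once and derives each position's relation tag and parent by
-- index arithmetic against the group boundaries, instead of A's interleaved append loop.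

-- ===== PORT A =====
-- the inner 'for child in childGroup' loop over one (childGroup, relation) pair
def makeEventLoop (predicateIndex : Int) (acc : List Int × List Int × List Int)
    (group : List Int) (relation : Int) : List Int × List Int × List Int :=
  group.foldl (fun acc child =>
    (acc.1 ++ [child], acc.2.1 ++ [relation], acc.2.2 ++ [predicateIndex])) acc

def makeEvent (predicate : Int) (subjects : List Int) (objects : List Int) (indirectObjects : List Int) : List Int × List Int × List Int :=
  let predicateIndex : Int := (subjects.length : Int) + objects.length + indirectObjects.length
  let acc : List Int × List Int × List Int := ([], [], [])
  let acc := [(subjects, (1 : Int)), (objects, 2), (indirectObjects, 3)].foldl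
    (fun acc gr => makeEventLoop predicateIndex acc gr.1 gr.2) acc
  (acc.1 ++ [predicate], acc.2.1 ++ [0], acc.2.2 ++ [predicateIndex + 1])

-- ===== PORT B =====
def makeEvent_alt (predicate : Int) (subjects : List Int) (objects : List Int) (indirectObjects : List Int) : List Int × List Int × List Int :=
  let s : Int := subjects.length
  let o : Int := objects.length
  let n : Int := s + o + indirectObjects.length
  (subjects ++ objects ++ indirectObjects ++ [predicate],
   (PySem.List.pyRange 0 (n + 1) 1).map (fun i =>
     if i == n then 0 else if i < s then 1 else if i < s + o then 2 else 3),
   (PySem.List.pyRange 0 (n + 1) 1).map (fun i => n + (if i == n then 1 else 0)))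

-- ===== PRECONDITION & SPEC =====
def Spec_makeEvent (predicate : Int) (subjects : List Int) (objects : List Int) (indirectObjects : List Int) (out : List Int × List Int × List Int) : Prop := out = makeEvent_alt predicate subjects objects indirectObjects
instance (predicate : Int) (subjects : List Int) (objects : List Int) (indirectObjects : List Int) (out : List Int × List Int × List Int) : Decidable (Spec_makeEvent predicate subjects objects indirectObjects out) := by unfold Spec_makeEvent; infer_instance

-- ===== CLAIM (what is proved, stated in full; the proofs are below) =====
def Claim_equal_makeEvent : Prop := ∀ (predicate : Int) (subjects : List Int) (objects : List Int) (indirectObjects : List Int), Dom_makeEvent predicate subjects objects indirectObjects → Spec_makeEvent predicate subjects objects indirectObjects (makeEvent predicate subjects objects indirectObjects)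

-- ===== LEMMAS AND PROOFS =====
-- A's inner loop in closed form: append + replicate
theorem makeEventLoop_eq (pi r : Int) (g : List Int) (acc : List Int × List Int × List Int) :
    makeEventLoop pi acc g r
      = (acc.1 ++ g, acc.2.1 ++ List.replicate g.length r, acc.2.2 ++ List.replicate g.length pi) := by
  induction g generalizing acc with
  | nil => simp [makeEventLoop]
  | cons x xs ih =>
      simp only [makeEventLoop, List.foldl_cons] at *
      rw [ih]
      simp [List.replicate_succ]

-- a map over List.range whose function is constant on the range
theorem map_range_const (m : ℕ) (c : Int) (g : ℕ → Int) (h : ∀ k < m, g k = c) :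
    (List.range m).map g = List.replicate m c := by
  induction m with
  | zero => simp
  | succ m ih =>
      rw [List.range_succ, List.map_append, List.replicate_succ',
        ih (fun k hk => h k (Nat.lt_succ_of_lt hk))]
      simp [h m (Nat.lt_succ_self m)]

-- B's position-classification comprehension equals the grouped replicate form
theorem rel_map_eq (s o io : ℕ) (g : Int → Int)
    (h0 : g ((s : Int) + o + io) = 0)
    (h1 : ∀ k : ℕ, k < s → g k = 1)
    (h2 : ∀ k : ℕ, k < o → g ((s : Int) + k) = 2)
    (h3 : ∀ k : ℕ, k < io → g ((s : Int) + o + k) = 3) :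
    (PySem.List.pyRange 0 ((s : Int) + o + io + 1) 1).map g
      = List.replicate s 1 ++ List.replicate o 2 ++ List.replicate io 3 ++ [0] := by
  rw [PySem.List.pyRange_one]
  have ht : (((s : Int) + o + io + 1) - 0).toNat = s + (o + (io + 1)) := by omega
  rw [ht, List.range_add, List.range_add, List.range_add]
  simp only [List.map_append, List.map_map, List.range_one, List.map_cons, List.map_nil,
    List.append_assoc]
  congr 1
  · exact map_range_const s 1 _ (by intro k hk; simpa using h1 k hk)
  congr 1
  · refine map_range_const o 2 _ ?_
    intro k hk
    simpa [Function.comp, add_comm, add_assoc, add_left_comm] using h2 k hk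
  congr 1
  · refine map_range_const io 3 _ ?_
    intro k hk
    have := h3 k hk
    simp only [Function.comp]
    convert this using 2
    push_cast
    ring
  · simp only [List.cons.injEq, and_true]
    convert h0 using 2
    push_cast
    ring

-- ===== VERDICT (by name: the statement is the Claim_ definition above) =====
theorem makeEvent_spec : Claim_equal_makeEvent := by
  intro predicate subjects objects indirectObjects _
  show _ = _
  simp only [makeEvent, makeEvent_alt, List.foldl_cons, List.foldl_nil, makeEventLoop_eq,
    List.nil_append, Prod.mk.injEq]
  refine ⟨by simp, ?_, ?_⟩
  · rw [rel_map_eq subjects.length objects.length indirectObjects.length]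
    · simp
    · intro k hk
      have h1 : ((k : Int)) ≠ (subjects.length : Int) + objects.length + indirectObjects.length := by
        omega
      have h2 : ((k : Int)) < (subjects.length : Int) := by exact_mod_cast hk
      simp [h1, h2]
    · intro k hk
      have h1 : ((subjects.length : Int) + k) ≠ (subjects.length : Int) + objects.length + indirectObjects.length ∨
          True := Or.inr trivial
      have hne : ((subjects.length : Int) + k) ≠ (subjects.length : Int) + objects.length + indirectObjects.length := by
        omega
      have hlt : ¬ ((subjects.length : Int) + k < (subjects.length : Int)) := by omega
      have hlt2 : (subjects.length : Int) + k < (subjects.length : Int) + objects.length := by omega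
      simp [hne, hlt, hlt2]
    · intro k hk
      have hne : ((subjects.length : Int) + objects.length + k) ≠ (subjects.length : Int) + objects.length + indirectObjects.length := by omega
      have hlt : ¬ ((subjects.length : Int) + objects.length + k < (subjects.length : Int)) := by omega
      have hlt2 : ¬ ((subjects.length : Int) + objects.length + k < (subjects.length : Int) + objects.length) := by omega
      simp [hne, hlt, hlt2]
  · have hm : (PySem.List.pyRange 0 ((subjects.length : Int) + objects.length + indirectObjects.length + 1) 1).map
        (fun i => (subjects.length : Int) + objects.length + indirectObjects.length + (if i == (subjects.length : Int) + objects.length + indirectObjects.length then 1 else 0))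
        = List.replicate (subjects.length + objects.length + indirectObjects.length)
            ((subjects.length : Int) + objects.length + indirectObjects.length)
          ++ [(subjects.length : Int) + objects.length + indirectObjects.length + 1] := by
      rw [PySem.List.pyRange_one]
      have ht : (((subjects.length : Int) + objects.length + indirectObjects.length + 1) - 0).toNat
          = (subjects.length + objects.length + indirectObjects.length) + 1 := by omega
      rw [ht, List.range_succ]
      simp only [List.map_append, List.map_map]
      congr 1
      · refine map_range_const _ _ _ ?_
        intro k hk
        have hne : ¬ ((k : Int) = (subjects.length : Int) + objects.length + indirectObjects.length) := by omega
        simp [Function.comp, hne]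
      · simp [Function.comp]
    rw [hm, ← List.replicate_add, ← List.replicate_add]
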